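-- pv_equiv track=rewrite | github.com/ministryofjustice/analytical-platform | terraform/aws/analytical-platform/baseline/modules/lambda-secret-updater/lambda/lambda_function.py | extract_sas_url
-- ===== SOURCE A (Python) =====
-- MARKER = "SAS URL:"
--
-- def extract_sas_url(content: str) -> str:
--     """
--     Extract the SAS URL from the string.
--     Args:
--         content: The string content to search for the SAS URL.
--     Returns:
--         The extracted SAS URL string.
--     Raises:
--         Exception: If SAS URL block is found but no URL is detected.
--     """
--     lines = content.splitlines()
--
--     for i, line in enumerate(lines):
--         if MARKER in line:
--             # Look at lines after MARKER"
--             for next_line in lines[i + 1:]: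
--                 stripped = next_line.strip()
--
--                 # Skip separator lines (====) and blanks
--                 if not stripped or stripped.startswith("="):
--                     continue
--
--                 return stripped
--
--     raise Exception("SAS URL block found but no URL detected.")
-- ===== SOURCE B (Python) =====
-- MARKER = "SAS URL:"
--
-- def extract_sas_url(content: str) -> str:
--     found = False
--     for line in content.splitlines():
--         if not found:
--             if MARKER in line:
--                 found = True
--         else:
--             stripped = line.strip()
--             if stripped and not stripped.startswith("="):
--                 return stripped
--     raise Exception("SAS URL block found but no URL detected.")
-- ===== Notes on version B (the rewrite author's own statement) =====
-- stated objective: simpler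
-- what changed: Replaces the nested outer/inner loops (rescanning the tail from every marker line) with a single linear pass carrying a boolean flag recording whether the marker has been seen.
import Mathlib
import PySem

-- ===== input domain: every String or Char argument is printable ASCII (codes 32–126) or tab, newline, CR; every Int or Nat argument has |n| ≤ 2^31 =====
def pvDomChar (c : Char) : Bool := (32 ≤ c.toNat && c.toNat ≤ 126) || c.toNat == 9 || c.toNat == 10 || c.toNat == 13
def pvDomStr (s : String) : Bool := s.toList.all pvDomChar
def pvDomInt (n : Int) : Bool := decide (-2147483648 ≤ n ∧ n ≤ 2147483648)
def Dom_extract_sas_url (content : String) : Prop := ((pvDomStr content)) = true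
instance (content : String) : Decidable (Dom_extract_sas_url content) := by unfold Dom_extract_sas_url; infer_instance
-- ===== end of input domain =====

-- B replaces A's nested outer/inner loops with one linear pass carrying a boolean flag
-- recording whether the marker has been seen (objective: simpler). Where the Python raises
-- (no marker line followed by a kept line), both ports return "" and those inputs are outside Pre_.

-- ===== PORT A =====
def MARKER : String := "SAS URL:"

-- inner loop of A: scan lines after a marker line, return the first kept stripped line
def pvInnerA : List String → Option String
  | [] => none
  | next_line :: rest =>
    let stripped := PySem.Str.strip next_line
    if stripped = "" ∨ PySem.Str.startswith stripped "=" = true then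
      pvInnerA rest
    else
      some stripped

-- outer loop of A: for each line containing MARKER, try the inner scan of the tail
def pvOuterA : List String → String
  | [] => ""
  | line :: rest =>
    if PySem.Str.isIn MARKER line = true then
      match pvInnerA rest with
      | some s => s
      | none => pvOuterA rest
    else
      pvOuterA rest

def extract_sas_url (content : String) : String :=
  pvOuterA (PySem.Str.splitlines content)

-- ===== PORT B =====
-- single pass over the lines with a Bool flag: before the marker only look for the
-- marker; after it return the first non-blank line not starting with '='
def pvScanB : Bool → List String → String
  | _, [] => ""
  | found, line :: rest =>
    if found then
      let stripped := PySem.Str.strip line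
      if stripped ≠ "" ∧ ¬ PySem.Str.startswith stripped "=" = true then
        stripped
      else
        pvScanB true rest
    else if PySem.Str.isIn MARKER line = true then
      pvScanB true rest
    else
      pvScanB false rest

def extract_sas_url_alt (content : String) : String :=
  pvScanB false (PySem.Str.splitlines content)

-- ===== PRECONDITION & SPEC =====
-- Pre_ excludes exactly the inputs on which the Python A raises its Exception:
-- those with no line containing MARKER followed (later) by a non-blank line not
-- beginning with an equals sign; B raises the same Exception there.
def Pre_extract_sas_url (content : String) : Prop :=
  let lines := PySem.Str.splitlines content
  ∃ i, i < lines.length ∧ ∃ j, j < lines.length ∧ i < j ∧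
    PySem.Str.isIn MARKER (lines.getD i "") = true ∧
    PySem.Str.strip (lines.getD j "") ≠ "" ∧
    PySem.Str.startswith (PySem.Str.strip (lines.getD j "")) "=" = false
instance (content : String) : Decidable (Pre_extract_sas_url content) := by
  unfold Pre_extract_sas_url; infer_instance
def pvWitness_extract_sas_url : String := "SAS URL:\nhttp://x"
def Spec_extract_sas_url (content : String) (out : String) : Prop := out = extract_sas_url_alt content
instance (content : String) (out : String) : Decidable (Spec_extract_sas_url content out) := by unfold Spec_extract_sas_url; infer_instance

-- ===== CLAIM (what is proved, stated in full; the proofs are below) =====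
def Claim_equal_extract_sas_url : Prop := ∀ (content : String), Dom_extract_sas_url content → Pre_extract_sas_url content → Spec_extract_sas_url content (extract_sas_url content)

-- ===== LEMMAS AND PROOFS =====
theorem pvOuterA_of_innerA_none (ls : List String) (h : pvInnerA ls = none) :
    pvOuterA ls = "" := by
  induction ls with
  | nil => rfl
  | cons l rest ih =>
    rw [pvInnerA] at h
    simp only [pvOuterA]
    split_ifs with hm
    · split at h
      · rw [h, ih h]
      · exact absurd h (by simp)
    · split at h
      · exact ih h
      · exact absurd h (by simp)

theorem pvScanB_true_eq (ls : List String) :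
    pvScanB true ls = (pvInnerA ls).getD "" := by
  induction ls with
  | nil => rfl
  | cons l rest ih =>
    rw [pvScanB, pvInnerA, if_pos (rfl : (true : Bool) = true)]
    show (if PySem.Str.strip l ≠ "" ∧ ¬ PySem.Str.startswith (PySem.Str.strip l) "=" = true then
        PySem.Str.strip l else pvScanB true rest) = _
    generalize PySem.Str.strip l = s
    by_cases h : s = "" ∨ PySem.Str.startswith s "=" = true
    · rw [if_pos h, if_neg (by tauto : ¬ (s ≠ "" ∧ ¬ PySem.Str.startswith s "=" = true)), ih]
    · rw [if_neg h, if_pos (by tauto : s ≠ "" ∧ ¬ PySem.Str.startswith s "=" = true), Option.getD_some]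

theorem pvOuterA_eq_pvScanB (ls : List String) : pvOuterA ls = pvScanB false ls := by
  induction ls with
  | nil => rfl
  | cons l rest ih =>
    rw [pvOuterA, pvScanB]
    by_cases hm : PySem.Str.isIn MARKER l = true
    · simp only [if_pos hm, if_neg (Bool.false_ne_true), pvScanB_true_eq]
      cases h : pvInnerA rest with
      | some s => simp
      | none => simp [pvOuterA_of_innerA_none rest h]
    · simp only [if_neg hm, if_neg (Bool.false_ne_true), ih]

-- ===== VERDICT (by name: the statement is the Claim_ definition above) =====
theorem extract_sas_url_spec : Claim_equal_extract_sas_url := by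
  intro content _ _
  unfold Spec_extract_sas_url extract_sas_url extract_sas_url_alt
  exact pvOuterA_eq_pvScanB _
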